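-- pv_equiv track=rewrite | github.com/Z-Sofiene/cryptography | py_codes/Classic_crypt_decrypt.py | Formatage
-- ===== SOURCE A (Python) =====
-- def Formatage(text):
--     message = ""
--     compteur = 0
--     for i in text:
--         compteur += 1
--         message += i
--         if compteur % 5 == 0:
--             message += " "
--     return message.upper()
-- ===== SOURCE B (Python) =====
-- def Formatage(text):
--     chunks = [text[i:i + 5] for i in range(0, len(text), 5)]
--     return "".join(c + " " if len(c) == 5 else c for c in chunks).upper()
-- ===== Notes on version B (the rewrite author's own statement) =====
-- stated objective: alternative
-- what changed: Replaces the per-character counter/modulo accumulation via repeated string concatenation with slicing the text into fixed-width windows of 5 and joining them, each full window carrying its trailing space.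
import Mathlib
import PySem

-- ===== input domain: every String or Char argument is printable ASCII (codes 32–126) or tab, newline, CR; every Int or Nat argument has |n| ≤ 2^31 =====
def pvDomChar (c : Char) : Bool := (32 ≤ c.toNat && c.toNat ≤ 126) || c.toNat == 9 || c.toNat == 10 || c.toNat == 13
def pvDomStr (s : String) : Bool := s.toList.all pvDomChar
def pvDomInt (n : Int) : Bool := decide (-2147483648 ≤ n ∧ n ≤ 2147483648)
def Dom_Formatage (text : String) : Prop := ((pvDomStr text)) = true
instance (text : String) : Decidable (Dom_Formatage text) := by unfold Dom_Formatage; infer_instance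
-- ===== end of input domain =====

-- B groups the text into windows of 5 by slicing and joins them (full windows keep their
-- trailing space) instead of A's per-character counter/modulo accumulation; alternative decomposition.

-- ===== PORT A =====
-- per-character loop: counter, append char, append ' ' when counter % 5 == 0; then .upper()
def Formatage (text : String) : String :=
  let st := text.toList.foldl
    (fun (st : List Char × Int) i =>
      let compteur := st.2 + 1
      let message := st.1 ++ [i]
      if PySem.Int.mod compteur 5 == 0 then (message ++ [' '], compteur)
      else (message, compteur))
    ([], 0)
  String.ofList (PySem.Chars.upper st.1)

-- ===== PORT B =====
-- slice into windows of 5 via range(0, len, 5); join, full windows get a trailing space; then .upper()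
def Formatage_alt (text : String) : String :=
  let cs := text.toList
  let chunks := (PySem.List.pyRange 0 (cs.length : Int) 5).map
    (fun i => PySem.List.slice cs (some i) (some (i + 5)))
  String.ofList (PySem.Chars.upper
    (PySem.Chars.join [] (chunks.map (fun c => if c.length == 5 then c ++ [' '] else c))))

-- ===== PRECONDITION & SPEC =====
def Spec_Formatage (text : String) (out : String) : Prop := out = Formatage_alt text
instance (text : String) (out : String) : Decidable (Spec_Formatage text out) := by unfold Spec_Formatage; infer_instance

-- ===== CLAIM (what is proved, stated in full; the proofs are below) =====
def Claim_equal_Formatage : Prop := ∀ (text : String), Dom_Formatage text → Spec_Formatage text (Formatage text)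

-- ===== LEMMAS AND PROOFS =====

-- the canonical "space after every full group of 5" recursion both ports are reduced to
def chunk5 (cs : List Char) : List Char :=
  if _h : 5 ≤ cs.length then
    cs.take 5 ++ ' ' :: chunk5 (cs.drop 5)
  else cs
termination_by cs.length
decreasing_by simp; omega

-- unrolled form of A's loop body, counter carried explicitly
def spacedAux : List Char → Int → List Char
  | [], _ => []
  | i :: rest, c =>
      (if PySem.Int.mod (c + 1) 5 == 0 then [i, ' '] else [i]) ++ spacedAux rest (c + 1)

lemma foldA_eq (cs : List Char) : ∀ (m : List Char) (c : Int),
    (cs.foldl (fun (st : List Char × Int) i =>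
      let compteur := st.2 + 1
      let message := st.1 ++ [i]
      if PySem.Int.mod compteur 5 == 0 then (message ++ [' '], compteur)
      else (message, compteur)) (m, c)).1 = m ++ spacedAux cs c := by
  induction cs with
  | nil => simp [spacedAux]
  | cons i rest ih =>
    intro m c
    simp only [List.foldl_cons, spacedAux]
    by_cases h : (PySem.Int.mod (c + 1) 5 == 0) = true
    · rw [if_pos h, if_pos h, ih]; simp
    · rw [if_neg h, if_neg h, ih]; simp

lemma mod5 (c : Int) : PySem.Int.mod c 5 = c % 5 := by
  simp [PySem.Int.mod, Int.fmod_eq_emod_of_nonneg]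

lemma spaced_eq_chunk : ∀ (n : Nat) (cs : List Char) (c : Int), cs.length ≤ n →
    c % 5 = 0 → spacedAux cs c = chunk5 cs := by
  intro n
  induction n with
  | zero =>
    intro cs c h _
    have : cs = [] := List.eq_nil_of_length_eq_zero (by omega)
    subst this; simp [spacedAux, chunk5]
  | succ n ih =>
    intro cs c hlen hc
    match cs with
    | [] => simp [spacedAux, chunk5]
    | [a] =>
      simp only [spacedAux, mod5]
      rw [chunk5]
      have h1 : (c + 1) % 5 ≠ 0 := by omega
      simp [h1]
    | [a, b] =>
      simp only [spacedAux, mod5]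
      rw [chunk5]
      have h1 : (c + 1) % 5 ≠ 0 := by omega
      have h2 : (c + 1 + 1) % 5 ≠ 0 := by omega
      simp [h1, h2]
    | [a, b, d] =>
      simp only [spacedAux, mod5]
      rw [chunk5]
      have h1 : (c + 1) % 5 ≠ 0 := by omega
      have h2 : (c + 1 + 1) % 5 ≠ 0 := by omega
      have h3 : (c + 1 + 1 + 1) % 5 ≠ 0 := by omega
      simp [h1, h2, h3]
    | [a, b, d, e] =>
      simp only [spacedAux, mod5]
      rw [chunk5]
      have h1 : (c + 1) % 5 ≠ 0 := by omega
      have h2 : (c + 1 + 1) % 5 ≠ 0 := by omega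
      have h3 : (c + 1 + 1 + 1) % 5 ≠ 0 := by omega
      have h4 : (c + 1 + 1 + 1 + 1) % 5 ≠ 0 := by omega
      simp [h1, h2, h3, h4]
    | a :: b :: d :: e :: f :: rest =>
      simp only [spacedAux, mod5]
      rw [chunk5]
      have h1 : (c + 1) % 5 ≠ 0 := by omega
      have h2 : (c + 1 + 1) % 5 ≠ 0 := by omega
      have h3 : (c + 1 + 1 + 1) % 5 ≠ 0 := by omega
      have h4 : (c + 1 + 1 + 1 + 1) % 5 ≠ 0 := by omega
      have h5 : (c + 1 + 1 + 1 + 1 + 1) % 5 = 0 := by omega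
      have hr : spacedAux rest (c + 1 + 1 + 1 + 1 + 1) = chunk5 rest := by
        apply ih rest _ (by simp at hlen ⊢; omega) h5
      simp [h1, h2, h3, h4, h5, hr]

lemma joinNil (x : List Char) (l : List (List Char)) :
    PySem.Chars.join [] (x :: l) = x ++ PySem.Chars.join [] l := by
  cases l with
  | nil => simp [PySem.Chars.join_singleton, PySem.Chars.join_nil]
  | cons y r => rw [PySem.Chars.join_cons_cons]; simp

lemma pyRange5_shift (a b c : Int) :
    PySem.List.pyRange (a + c) (b + c) 5 = (PySem.List.pyRange a b 5).map (· + c) := by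
  rw [PySem.List.pyRange_of_pos _ _ (by norm_num), PySem.List.pyRange_of_pos _ _ (by norm_num)]
  by_cases hab : a < b
  · rw [if_pos (by omega : a + c < b + c), if_pos hab,
      show b + c - (a + c) = b - a by ring, List.map_map]
    exact List.map_congr_left fun k _ => by simp; ring
  · rw [if_neg (by omega : ¬ a + c < b + c), if_neg hab]; simp

lemma pyRange5_cons (a b : Int) (h : a < b) :
    PySem.List.pyRange a b 5 = a :: PySem.List.pyRange (a + 5) b 5 := by
  rw [PySem.List.pyRange_of_pos _ _ (by norm_num), PySem.List.pyRange_of_pos _ _ (by norm_num)]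
  have hn : ((b - a + 5 - 1) / 5).toNat = (if a + 5 < b then ((b - (a + 5) + 5 - 1) / 5).toNat else 0) + 1 := by
    split <;> omega
  rw [if_pos h, hn, List.range_succ_eq_map, List.map_cons, List.map_map]
  refine List.cons_eq_cons.mpr ⟨by simp, ?_⟩
  apply List.map_congr_left
  intro k _
  simp [Nat.succ_eq_add_one]
  ring

-- B's join-of-slices equals chunk5
lemma bjoin_eq_chunk : ∀ (n : Nat) (cs : List Char), cs.length ≤ n →
    PySem.Chars.join [] (((PySem.List.pyRange 0 (cs.length : Int) 5).map
      (fun i => PySem.List.slice cs (some i) (some (i + 5)))).map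
      (fun c => if c.length == 5 then c ++ [' '] else c)) = chunk5 cs := by
  intro n
  induction n with
  | zero =>
    intro cs h
    have : cs = [] := List.eq_nil_of_length_eq_zero (by omega)
    subst this
    rw [PySem.List.pyRange_of_pos _ _ (by norm_num)]
    simp [PySem.Chars.join_nil, chunk5]
  | succ n ih =>
    intro cs hlen
    rcases Nat.eq_zero_or_pos cs.length with h0 | hpos
    · have : cs = [] := List.eq_nil_of_length_eq_zero h0
      subst this
      rw [PySem.List.pyRange_of_pos _ _ (by norm_num)]
      simp [PySem.Chars.join_nil, chunk5]
    · rw [pyRange5_cons 0 (cs.length : Int) (by exact_mod_cast hpos)]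
      simp only [List.map_cons]
      rw [joinNil]
      have hslice0 : PySem.List.slice cs (some 0) (some (0 + 5)) = cs.take 5 := by
        rw [show ((0 : Int) + 5) = ((5 : Nat) : Int) by norm_num]
        rw [PySem.List.slice_toNat cs (by norm_num) (by norm_num)]
        simp
      by_cases h5 : 5 ≤ cs.length
      · -- full first chunk
        have htk : (cs.take 5).length = 5 := by simp; omega
        have hrest : PySem.List.pyRange (0 + 5) (cs.length : Int) 5
            = (PySem.List.pyRange 0 ((cs.drop 5).length : Int) 5).map (· + 5) := by
          have : ((cs.drop 5).length : Int) + 5 = (cs.length : Int) := by simp; omega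
          rw [← this, show ((0 : Int) + 5) = 0 + 5 by ring, pyRange5_shift]
        have hsl : ∀ i ∈ PySem.List.pyRange 0 ((cs.drop 5).length : Int) 5,
            PySem.List.slice cs (some (i + 5)) (some (i + 5 + 5))
              = PySem.List.slice (cs.drop 5) (some i) (some (i + 5)) := by
          intro i hi
          have hi0 : 0 ≤ i := ((PySem.List.mem_pyRange_iff_of_pos (by norm_num) i).1 hi).1
          rw [PySem.List.slice_toNat cs (by omega) (by omega),
              PySem.List.slice_toNat (cs.drop 5) hi0 (by omega)]
          rw [List.drop_drop]
          congr 1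
          · omega
          · congr 1; omega
        rw [chunk5]; rw [dif_pos h5]
        rw [hslice0]
        rw [if_pos (by simp [htk])]
        have : ((PySem.List.pyRange (0 + 5) (cs.length : Int) 5).map
              (fun i => PySem.List.slice cs (some i) (some (i + 5)))).map
              (fun c => if c.length == 5 then c ++ [' '] else c)
            = ((PySem.List.pyRange 0 ((cs.drop 5).length : Int) 5).map
              (fun i => PySem.List.slice (cs.drop 5) (some i) (some (i + 5)))).map
              (fun c => if c.length == 5 then c ++ [' '] else c) := by
          rw [hrest]
          simp only [List.map_map]
          apply List.map_congr_left
          intro i hi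
          simp only [Function.comp_apply]
          rw [hsl i hi]
        rw [this, ih (cs.drop 5) (by simp; omega)]
        simp
      · -- short (or exact) final chunk: range (0+5).. is empty
        have hre : PySem.List.pyRange (0 + 5) (cs.length : Int) 5 = [] := by
          rw [PySem.List.pyRange_of_pos _ _ (by norm_num)]
          rw [if_neg (by push_cast; omega)]
          simp
        rw [hre]
        simp only [List.map_nil, PySem.Chars.join_nil, List.append_nil]
        have htk : cs.take 5 = cs := List.take_of_length_le (by omega)
        rw [hslice0, htk]
        rw [if_neg (by simp; omega)]
        rw [chunk5, dif_neg h5]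

-- ===== VERDICT (by name: the statement is the Claim_ definition above) =====
theorem Formatage_spec : Claim_equal_Formatage := by
  intro text _
  unfold Spec_Formatage Formatage Formatage_alt
  simp only []
  congr 1
  rw [foldA_eq]
  rw [spaced_eq_chunk text.toList.length text.toList 0 le_rfl (by norm_num)]
  rw [bjoin_eq_chunk text.toList.length text.toList le_rfl]
  simp
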